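-- pv_equiv track=rewrite | github.com/YuChengHsieh/LeetCode | Problem_List/02306.py | distinctNames
-- ===== SOURCE A (Python) =====
-- def distinctNames(ideas: list[str]) -> int:
--     hash_set = [set() for _ in range(26)]
--     # eg. cofffee : hash_set[2] = 'offee', donuts: hash_set[3] = 'onuts'
--     for idea in ideas:
--         hash_set[ord(idea[0])-ord('a')].add(idea[1:])
--
--     cnt = 0
--     for i in range(26):
--         for j in range(i+1,26):
--             intersection = hash_set[i]&hash_set[j]
--             cnt += len(hash_set[i]-intersection)*len(hash_set[j]-intersection)*2
--     return cnt
-- ===== SOURCE B (Python) =====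
-- def distinctNames(ideas: list[str]) -> int:
--     # Invert the indexing: group by suffix instead of by first letter.
--     suffix_letters = {}
--     for idea in ideas:
--         suffix_letters.setdefault(idea[1:], set()).add(idea[0])
--     # size[x]   = number of distinct suffixes that occur with first letter x
--     # shared[(x,y)] = number of distinct suffixes occurring with both x and y (x < y)
--     size = {}
--     shared = {}
--     for letters in suffix_letters.values():
--         for a in letters:
--             size[a] = size.get(a, 0) + 1
--             for b in letters:
--                 if a < b:
--                     shared[(a, b)] = shared.get((a, b), 0) + 1
--     cnt = 0
--     for i in range(26):
--         x = chr(97 + i)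
--         for j in range(i + 1, 26):
--             y = chr(97 + j)
--             m = shared.get((x, y), 0)
--             cnt += (size.get(x, 0) - m) * (size.get(y, 0) - m) * 2
--     return cnt
-- ===== Notes on version B (the rewrite author's own statement) =====
-- stated objective: alternative
-- what changed: B inverts A's indexing: instead of bucketing suffixes under each first letter and intersecting/subtracting suffix-sets for every letter pair, B groups the first-letter set of each distinct suffix in one pass, accumulates a per-letter distinct-suffix count and a shared-suffix counter per letter pair, and computes each pair's contribution as (size_x-shared)*(size_y-shared)*2 from those counters.
-- outside the precondition, e.g. on distinctNames(['Gx', 'bz']): A returns 2, B returns 0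
import Mathlib
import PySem

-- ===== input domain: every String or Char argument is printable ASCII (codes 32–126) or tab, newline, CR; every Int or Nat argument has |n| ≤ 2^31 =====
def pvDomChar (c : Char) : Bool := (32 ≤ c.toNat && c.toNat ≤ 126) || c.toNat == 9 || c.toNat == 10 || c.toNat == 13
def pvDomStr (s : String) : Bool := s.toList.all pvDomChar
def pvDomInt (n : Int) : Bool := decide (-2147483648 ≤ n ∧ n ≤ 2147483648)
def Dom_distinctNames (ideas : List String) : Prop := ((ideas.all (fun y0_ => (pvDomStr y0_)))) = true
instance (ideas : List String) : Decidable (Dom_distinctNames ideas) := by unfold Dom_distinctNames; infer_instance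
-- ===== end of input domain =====

-- B inverts the indexing: it groups, per distinct suffix, the set of first letters, accumulates a
-- per-letter distinct-suffix count and a shared-suffix counter per letter pair, and combines them
-- arithmetically per pair — an alternative to A's per-letter suffix buckets with pairwise set
-- intersection/difference; equal on Pre_ (first letters 'a'..'z').

-- shared helpers: the Python expressions idea[0] and idea[1:] appear verbatim in both programs
-- pvFirst s = idea[0] (the default ' ' is only reached when s = "", which Pre_ excludes)
def pvFirst (s : String) : Char := (PySem.Str.pyGet? s 0).getD ' '
def pvSuffix (s : String) : String := PySem.Str.slice s (some 1) none

-- ===== PORT A =====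
-- hash_set[i].add(x): Python list indexing (a negative index wraps once); out of range =
-- IndexError, excluded by Pre_; there the port leaves the list unchanged
def pvBucketAdd (hs : List (PySem.Set String)) (i : Int) (x : String) : List (PySem.Set String) :=
  let k : Int := if i < 0 then i + hs.length else i
  if 0 ≤ k ∧ k < hs.length then hs.modify k.toNat (fun s => PySem.Set.add s x) else hs

def distinctNames (ideas : List String) : Int :=
  let hs0 : List (PySem.Set String) := List.replicate 26 []
  let hs := ideas.foldl
    (fun hs idea => pvBucketAdd hs (((pvFirst idea).toNat : Int) - 97) (pvSuffix idea)) hs0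
  (PySem.List.pyRange 0 26).foldl (fun cnt i =>
    (PySem.List.pyRange (i + 1) 26).foldl (fun cnt j =>
      let si := PySem.List.pyGetD hs i []
      let sj := PySem.List.pyGetD hs j []
      let inter := PySem.Set.inter si sj
      cnt + PySem.Set.len (PySem.Set.diff si inter) * PySem.Set.len (PySem.Set.diff sj inter) * 2)
      cnt) 0

-- ===== PORT B =====
-- the inner "for b in letters: if a < b: shared[(a,b)] = shared.get((a,b),0)+1" loop
def pvInnerShared (letters : List Char) (a : Char) (sh : PySem.Dict (Char × Char) Int) :
    PySem.Dict (Char × Char) Int :=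
  letters.foldl (fun sh b => if a < b then sh.insert (a, b) (sh.getD (a, b) 0 + 1) else sh) sh

def distinctNames_alt (ideas : List String) : Int :=
  let sl : PySem.Dict String (PySem.Set Char) :=
    ideas.foldl (fun g idea =>
      g.modify (pvSuffix idea) [] (fun s => PySem.Set.add s (pvFirst idea))) PySem.Dict.empty
  -- the counting loop over suffix_letters.values(): both counters are only read back by getD
  -- afterwards, so the (unmodelled) set iteration order cannot affect the result
  let p : PySem.Dict Char Int × PySem.Dict (Char × Char) Int :=
    sl.values.foldl (fun p letters =>
      letters.foldl (fun p a =>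
        (p.1.insert a (p.1.getD a 0 + 1), pvInnerShared letters a p.2)) p)
      (PySem.Dict.empty, PySem.Dict.empty)
  (PySem.List.pyRange 0 26).foldl (fun cnt i =>
    let x := Char.ofNat (97 + i).toNat
    (PySem.List.pyRange (i + 1) 26).foldl (fun cnt j =>
      let y := Char.ofNat (97 + j).toNat
      let m := p.2.getD (x, y) 0
      cnt + (p.1.getD x 0 - m) * (p.1.getD y 0 - m) * 2) cnt) 0

-- ===== PRECONDITION & SPEC =====
-- Pre_ excludes the inputs where A raises IndexError (an empty idea, or a first character below 'G'
-- or above 'z'), and also the inputs whose first characters fall in 'G'..'`', where A still returns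
-- but its value is an artefact of negative-index wraparound (ord(c)-97 in [-26,-1] silently merges
-- those names into the bucket of the letter 26 code points up): Pre_ keeps exactly the lists whose
-- ideas all start with a lowercase letter 'a'..'z' (pvFirst "" = ' ', code 32, so empties are out).
def Pre_distinctNames (ideas : List String) : Prop :=
  ∀ s ∈ ideas, 97 ≤ (pvFirst s).toNat ∧ (pvFirst s).toNat ≤ 122
instance (ideas : List String) : Decidable (Pre_distinctNames ideas) := by
  unfold Pre_distinctNames; infer_instance
def pvWitness_distinctNames : List String := ["coffee", "donuts", "time", "toffee"]

def Spec_distinctNames (ideas : List String) (out : Int) : Prop :=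
  out = distinctNames_alt ideas
instance (ideas : List String) (out : Int) : Decidable (Spec_distinctNames ideas out) := by
  unfold Spec_distinctNames; infer_instance

-- ===== CLAIM (what is proved, stated in full; the proofs are below) =====
def Claim_equal_distinctNames : Prop :=
  ∀ (ideas : List String), Dom_distinctNames ideas → Pre_distinctNames ideas →
    Spec_distinctNames ideas (distinctNames ideas)

-- ===== LEMMAS AND PROOFS =====

-- the suffix set A keeps for first letter c, and the letter set B keeps for suffix suf
def pvBktC (ideas : List String) (c : Char) : PySem.Set String :=
  ideas.foldl (fun s idea => if pvFirst idea = c then PySem.Set.add s (pvSuffix idea) else s) []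
def pvLset (ideas : List String) (suf : String) : PySem.Set Char :=
  ideas.foldl (fun s idea => if pvSuffix idea = suf then PySem.Set.add s (pvFirst idea) else s) []

-- A's effective bucket index for a first character with code in [71,122]
def pvEff (c : Char) : Nat := if c.toNat ≤ 96 then c.toNat - 71 else c.toNat - 97
def pvBktE (ideas : List String) (k : Nat) : PySem.Set String :=
  ideas.foldl (fun s idea => if pvEff (pvFirst idea) = k then PySem.Set.add s (pvSuffix idea) else s) []

theorem pvChar_eq_of_toNat (a b : Char) (h : a.toNat = b.toNat) : a = b := by
  rw [← Char.ofNat_toNat a, ← Char.ofNat_toNat b, h]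

theorem pvChrToNat (n : Nat) (h : n < 55296) : (Char.ofNat n).toNat = n := by
  have hv : Nat.isValidChar n := Or.inl h
  simp [Char.ofNat, hv, Char.ofNatAux, Char.toNat]

theorem pvCharLt (a b : Char) : a < b ↔ a.toNat < b.toNat := by
  rw [Char.lt_def]; exact UInt32.lt_iff_toNat_lt

-- s - (s & t) = s - t and t - (s & t) = t - s, at the level of Python's element lists
theorem pvDiff_inter (s t : PySem.Set String) :
    PySem.Set.diff s (PySem.Set.inter s t) = PySem.Set.diff s t := by
  simp only [PySem.Set.diff, PySem.Set.inter]
  apply List.filter_congr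
  intro x hx
  simp only [PySem.Set.contains]
  simp [hx]

theorem pvDiff_inter' (s t : PySem.Set String) :
    PySem.Set.diff t (PySem.Set.inter s t) = PySem.Set.diff t s := by
  simp only [PySem.Set.diff, PySem.Set.inter]
  apply List.filter_congr
  intro x hx
  simp only [PySem.Set.contains]
  simp [hx]

theorem pvLenDiff (s t : PySem.Set String) :
    PySem.Set.len (PySem.Set.diff s t) = PySem.Set.len s - PySem.Set.len (PySem.Set.inter s t) := by
  simp only [PySem.Set.diff, PySem.Set.inter, PySem.Set.len]
  have h := List.length_eq_length_filter_add (fun x => PySem.Set.contains t x) (l := s)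
  omega

theorem pvLenInterComm (s t : PySem.Set String) (hs : s.Nodup) (ht : t.Nodup) :
    PySem.Set.len (PySem.Set.inter s t) = PySem.Set.len (PySem.Set.inter t s) := by
  simp only [PySem.Set.len]
  congr 1
  apply List.Perm.length_eq
  rw [List.perm_ext_iff_of_nodup (PySem.Set.nodup_inter s t hs) (PySem.Set.nodup_inter t s ht)]
  intro a
  rw [PySem.Set.mem_inter, PySem.Set.mem_inter]
  exact and_comm

theorem pvBucketAdd_length (hs : List (PySem.Set String)) (i : Int) (x : String) :
    (pvBucketAdd hs i x).length = hs.length := by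
  simp only [pvBucketAdd]; split <;> split <;> simp [List.length_modify]

theorem pvEff_lt (c : Char) (h1 : 71 ≤ c.toNat) (h2 : c.toNat ≤ 122) : pvEff c < 26 := by
  unfold pvEff; split <;> omega

-- A's bucket update, read back at position k
theorem pvBucketAdd_getD (hs : List (PySem.Set String)) (c : Char) (x : String)
    (hlen : hs.length = 26) (h1 : 71 ≤ c.toNat) (h2 : c.toNat ≤ 122) (k : Nat) :
    (pvBucketAdd hs ((c.toNat : Int) - 97) x).getD k [] =
      if pvEff c = k then PySem.Set.add (hs.getD k []) x else hs.getD k [] := by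
  have hlt : pvEff c < 26 := pvEff_lt c h1 h2
  have hmain : pvBucketAdd hs ((c.toNat : Int) - 97) x
      = hs.modify (pvEff c) (fun s => PySem.Set.add s x) := by
    simp only [pvBucketAdd, hlen]
    rw [if_pos (by split <;> omega)]
    congr 1
    unfold pvEff
    split <;> split <;> omega
  rw [hmain]
  by_cases hk : k < 26
  · have hk1 : k < hs.length := by omega
    have hk2 : k < (hs.modify (pvEff c) (fun s => PySem.Set.add s x)).length := by
      simp [List.length_modify]; omega
    rw [List.getD_eq_getElem _ _ hk2, List.getElem_modify]
    by_cases he : pvEff c = k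
    · rw [if_pos he, if_pos he, List.getD_eq_getElem _ _ hk1]
    · rw [if_neg he, if_neg he, List.getD_eq_getElem _ _ hk1]
  · rw [List.getD_eq_default _ _ (by simp [List.length_modify]; omega),
        List.getD_eq_default _ _ (by omega)]
    rw [if_neg (by omega)]

-- A's first phase builds exactly the 26 buckets pvBktE
theorem pvA_fold (ideas : List String)
    (hv : ∀ s ∈ ideas, 71 ≤ (pvFirst s).toNat ∧ (pvFirst s).toNat ≤ 122)
    (hs : List (PySem.Set String)) (hlen : hs.length = 26) :
    ideas.foldl (fun hs idea => pvBucketAdd hs (((pvFirst idea).toNat : Int) - 97) (pvSuffix idea)) hs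
    = (List.range 26).map (fun k =>
        ideas.foldl (fun s idea =>
          if pvEff (pvFirst idea) = k then PySem.Set.add s (pvSuffix idea) else s) (hs.getD k [])) := by
  induction ideas generalizing hs with
  | nil =>
    simp only [List.foldl_nil]
    apply List.ext_getElem
    · simp [hlen]
    · intro k h1 h2
      simp only [List.length_map, List.length_range] at h2
      simp only [List.getElem_map, List.getElem_range]
      rw [List.getD_eq_getElem _ _ (by omega)]
  | cons idea rest ih =>
    simp only [List.foldl_cons]
    rw [ih (fun s hm => hv s (List.mem_cons_of_mem _ hm)) _
        (by rw [pvBucketAdd_length, hlen])]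
    apply List.map_congr_left
    intro k hk
    rw [pvBucketAdd_getD hs (pvFirst idea) (pvSuffix idea) hlen
        (hv idea (List.mem_cons_self)).1 (hv idea (List.mem_cons_self)).2]

-- under Pre_, A's bucket k is exactly B's suffix set for chr(97+k)
theorem pvBktE_eq (ideas : List String)
    (hv : ∀ s ∈ ideas, 97 ≤ (pvFirst s).toNat ∧ (pvFirst s).toNat ≤ 122)
    (k : Nat) (hk : k < 26) :
    pvBktE ideas k = pvBktC ideas (Char.ofNat (97 + k)) := by
  have hto : (Char.ofNat (97 + k)).toNat = 97 + k := pvChrToNat _ (by omega)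
  unfold pvBktE pvBktC
  apply PySem.List.foldl_congr_mem
  intro acc s hs
  have h1 := hv s hs
  by_cases he : pvEff (pvFirst s) = k
  · rw [if_pos he, if_pos ?_]
    apply pvChar_eq_of_toNat
    rw [hto]
    unfold pvEff at he
    rw [if_neg (by omega)] at he
    omega
  · rw [if_neg he, if_neg ?_]
    intro hc
    apply he
    unfold pvEff
    rw [if_neg (by omega)]
    have : (pvFirst s).toNat = 97 + k := by rw [hc, hto]
    omega

-- membership in a conditional Set.add fold
theorem pvMemCondFold {α β : Type} [BEq β] [LawfulBEq β] (l : List α) (P : α → Prop)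
    [DecidablePred P] (f : α → β) (y : β) (s0 : PySem.Set β) :
    y ∈ l.foldl (fun s b => if P b then PySem.Set.add s (f b) else s) s0 ↔
      y ∈ s0 ∨ ∃ b ∈ l, P b ∧ f b = y := by
  induction l generalizing s0 with
  | nil => simp
  | cons b l ih =>
    simp only [List.foldl_cons]
    rw [ih]
    by_cases hb : P b
    · rw [if_pos hb]
      rw [PySem.Set.mem_add]
      constructor
      · rintro (⟨h | h⟩ | h)
        · exact Or.inl h
        · exact Or.inr ⟨b, List.mem_cons_self, hb, h.symm⟩
        · obtain ⟨c, hc, hP, hf⟩ := h; exact Or.inr ⟨c, List.mem_cons_of_mem _ hc, hP, hf⟩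
      · rintro (h | ⟨c, hc, hP, hf⟩)
        · exact Or.inl (Or.inl h)
        · rcases List.mem_cons.mp hc with rfl | hc
          · exact Or.inl (Or.inr hf.symm)
          · exact Or.inr ⟨c, hc, hP, hf⟩
    · rw [if_neg hb]
      constructor
      · rintro (h | ⟨c, hc, hP, hf⟩)
        · exact Or.inl h
        · exact Or.inr ⟨c, List.mem_cons_of_mem _ hc, hP, hf⟩
      · rintro (h | ⟨c, hc, hP, hf⟩)
        · exact Or.inl h
        · rcases List.mem_cons.mp hc with rfl | hc
          · exact absurd hP hb
          · exact Or.inr ⟨c, hc, hP, hf⟩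

-- a conditional Set.add fold from a Nodup start stays Nodup
theorem pvNodupCondFold {α β : Type} [BEq β] [LawfulBEq β] (l : List α) (P : α → Prop)
    [DecidablePred P] (f : α → β) (s0 : PySem.Set β) (h : s0.Nodup) :
    (l.foldl (fun s b => if P b then PySem.Set.add s (f b) else s) s0).Nodup := by
  induction l generalizing s0 with
  | nil => exact h
  | cons b l ih =>
    simp only [List.foldl_cons]
    split
    · exact ih _ (PySem.Set.nodup_add _ _ h)
    · exact ih _ h

-- B's suffix dict, read back at key suf
theorem pvSL_getD (ideas : List String) (d : PySem.Dict String (PySem.Set Char)) (suf : String) :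
    (ideas.foldl (fun g idea =>
        g.modify (pvSuffix idea) [] (fun s => PySem.Set.add s (pvFirst idea))) d).getD suf []
    = ideas.foldl (fun s idea =>
        if pvSuffix idea = suf then PySem.Set.add s (pvFirst idea) else s) (d.getD suf []) := by
  induction ideas generalizing d with
  | nil => rfl
  | cons idea rest ih =>
    simp only [List.foldl_cons]
    rw [ih]
    rw [PySem.Dict.getD_modify]
    by_cases he : pvSuffix idea = suf
    · rw [if_pos he.symm, if_pos he, he]
    · rw [if_neg (fun h => he h.symm), if_neg he]

-- a fold whose step updates the two components independently splits
theorem pvFoldPair {α β γ : Type} (l : List α) (f : β → α → β) (g : γ → α → γ) (p : β × γ) :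
    l.foldl (fun p a => (f p.1 a, g p.2 a)) p = (l.foldl f p.1, l.foldl g p.2) := by
  induction l generalizing p with
  | nil => rfl
  | cons a l ih => simp only [List.foldl_cons]; rw [ih]

-- guarded counting fold, read back at key v
theorem pvGuardCount {α κ : Type} [BEq κ] [LawfulBEq κ] [DecidableEq κ] (l : List α)
    (P : α → Prop) [DecidablePred P] (key : α → κ) (v : κ) (d : PySem.Dict κ Int) :
    (l.foldl (fun d b => if P b then d.insert (key b) (d.getD (key b) 0 + 1) else d) d).getD v 0
    = d.getD v 0 + (((l.filter (fun b => decide (P b))).map key).count v : Int) := by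
  induction l generalizing d with
  | nil => simp
  | cons b l ih =>
    simp only [List.foldl_cons, List.filter_cons]
    by_cases hb : P b
    · rw [if_pos hb, if_pos (by simpa using hb), ih]
      simp only [List.map_cons, List.count_cons]
      rw [PySem.Dict.getD_insert]
      by_cases hv : v = key b
      · rw [if_pos hv, hv, if_pos (by simp)]
        push_cast
        ring
      · rw [if_neg hv, if_neg (by simpa using fun h => hv h.symm)]
        push_cast
        ring
    · rw [if_neg hb, if_neg (by simpa using hb), ih]

theorem pvCountPair (L : List Char) (a x y : Char) :
    (L.map (fun b => (a, b))).count (x, y) = if a = x then L.count y else 0 := by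
  induction L with
  | nil => simp
  | cons b L ih =>
    simp only [List.map_cons, List.count_cons, ih]
    by_cases hax : a = x
    · by_cases hby : b = y
      · simp [hax, hby]
      · simp [hax, hby, Prod.ext_iff]
    · simp [hax, Prod.ext_iff]

-- the size counter over a list of letter groups
theorem pvSizeFold (LS : List (List Char)) (x : Char) (d : PySem.Dict Char Int) :
    (LS.foldl (fun d L => L.foldl (fun d a => d.insert a (d.getD a 0 + 1)) d) d).getD x 0
    = d.getD x 0 + (LS.map (fun L => (L.count x : Int))).sum := by
  induction LS generalizing d with
  | nil => simp
  | cons L LS ih =>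
    simp only [List.foldl_cons, List.map_cons, List.sum_cons]
    rw [ih, PySem.Dict.getD_foldl_insert_add_one]
    ring

-- pvInnerShared, read back at (x, y)
theorem pvInnerShared_getD (letters : List Char) (a x y : Char) (sh : PySem.Dict (Char × Char) Int) :
    (pvInnerShared letters a sh).getD (x, y) 0
    = sh.getD (x, y) 0 +
        (if a = x then (((letters.filter (fun b => decide (x < b))).count y : Nat) : Int) else 0) := by
  unfold pvInnerShared
  rw [pvGuardCount letters (fun b => a < b) (fun b => (a, b)) (x, y) sh]
  rw [pvCountPair]
  by_cases hax : a = x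
  · rw [if_pos hax, if_pos hax, hax]
  · rw [if_neg hax, if_neg hax]
    simp

-- the a-loop over one letter group
theorem pvSharedLetters (letters : List Char) (x y : Char) (l' : List Char)
    (sh : PySem.Dict (Char × Char) Int) :
    (l'.foldl (fun sh a => pvInnerShared letters a sh) sh).getD (x, y) 0
    = sh.getD (x, y) 0 +
        (l'.count x : Int) * (((letters.filter (fun b => decide (x < b))).count y : Nat) : Int) := by
  induction l' generalizing sh with
  | nil => simp
  | cons a l' ih =>
    simp only [List.foldl_cons, List.count_cons]
    rw [ih, pvInnerShared_getD]
    by_cases hax : a = x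
    · rw [if_pos hax, if_pos (by simpa using hax)]
      push_cast
      ring
    · rw [if_neg hax, if_neg (by simpa using hax)]
      push_cast
      ring

-- the shared counter over a list of letter groups
theorem pvSharedFold (LS : List (List Char)) (x y : Char) (hxy : x < y)
    (hnd : ∀ L ∈ LS, L.Nodup) (sh : PySem.Dict (Char × Char) Int) :
    (LS.foldl (fun sh L => L.foldl (fun sh a => pvInnerShared L a sh) sh) sh).getD (x, y) 0
    = sh.getD (x, y) 0 + (LS.map (fun L => if x ∈ L ∧ y ∈ L then (1 : Int) else 0)).sum := by
  induction LS generalizing sh with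
  | nil => simp
  | cons L LS ih =>
    simp only [List.foldl_cons, List.map_cons, List.sum_cons]
    rw [ih (fun L hL => hnd L (List.mem_cons_of_mem _ hL)) _, pvSharedLetters]
    have hL := hnd L List.mem_cons_self
    have hcnt : ((L.count x : Int)) * (((L.filter (fun b => decide (x < b))).count y : Nat) : Int)
        = if x ∈ L ∧ y ∈ L then (1 : Int) else 0 := by
      by_cases hx : x ∈ L
      · by_cases hy : y ∈ L
        · rw [if_pos ⟨hx, hy⟩, List.count_eq_one_of_mem hL hx,
            List.count_eq_one_of_mem (hL.filter _) (List.mem_filter.mpr ⟨hy, by simpa using hxy⟩)]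
          norm_num
        · rw [if_neg (fun h => hy h.2),
            List.count_eq_zero_of_not_mem (fun h => hy (List.mem_filter.mp h).1)]
          norm_num
      · rw [if_neg (fun h => hx h.1), List.count_eq_zero_of_not_mem hx]
        norm_num
    rw [hcnt]
    ring

-- a 0/1 sum over a Nodup index list counts the members of an included Nodup list
theorem pvCountK {α : Type} [DecidableEq α] (K : List α) (hK : K.Nodup) (S : List α)
    (hS : S.Nodup) (hsub : ∀ a ∈ S, a ∈ K) :
    (K.map (fun k => if k ∈ S then (1 : Int) else 0)).sum = (S.length : Int) := by
  have h1 : (K.map (fun k => if k ∈ S then (1 : Int) else 0))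
      = (K.map (fun k => if (fun k => decide (k ∈ S)) k = true then (1 : Int) else 0)) := by
    apply List.map_congr_left; intro k _; simp
  rw [h1, PySem.List.sum_map_ite_one_zero, List.countP_eq_length_filter]
  congr 1
  apply List.Perm.length_eq
  rw [List.perm_ext_iff_of_nodup (hK.filter _) hS]
  intro a
  rw [List.mem_filter]
  simp only [decide_eq_true_eq]
  exact ⟨fun h => h.2, fun h => ⟨hsub a h, h⟩⟩

theorem pvBktC_nodup (ideas : List String) (c : Char) : (pvBktC ideas c).Nodup :=
  pvNodupCondFold _ _ _ _ List.nodup_nil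

theorem pvLset_nodup (ideas : List String) (suf : String) : (pvLset ideas suf).Nodup :=
  pvNodupCondFold _ _ _ _ List.nodup_nil

-- x is a first letter recorded for suffix suf iff suf is a suffix recorded for letter x
theorem pvMem_swap (ideas : List String) (x : Char) (suf : String) :
    x ∈ pvLset ideas suf ↔ suf ∈ pvBktC ideas x := by
  unfold pvLset pvBktC
  rw [pvMemCondFold, pvMemCondFold]
  simp only [List.not_mem_nil, false_or]
  constructor
  · rintro ⟨s, hs, h1, h2⟩; exact ⟨s, hs, h2, h1⟩
  · rintro ⟨s, hs, h1, h2⟩; exact ⟨s, hs, h2, h1⟩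

theorem pvBktC_sub (ideas : List String) (c : Char) :
    ∀ suf ∈ pvBktC ideas c, suf ∈ PySem.Set.ofList (ideas.map pvSuffix) := by
  intro suf hsuf
  rw [PySem.Set.mem_ofList]
  unfold pvBktC at hsuf
  rw [pvMemCondFold] at hsuf
  simp only [List.not_mem_nil, false_or] at hsuf
  obtain ⟨s, hs, _, hf⟩ := hsuf
  exact List.mem_map.mpr ⟨s, hs, hf⟩

-- B's per-letter count over the distinct suffixes is A's bucket size
theorem pvSize_eq (ideas : List String) (x : Char) :
    ((PySem.Set.ofList (ideas.map pvSuffix)).map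
        (fun suf => ((pvLset ideas suf).count x : Int))).sum
    = PySem.Set.len (pvBktC ideas x) := by
  have h : ((PySem.Set.ofList (ideas.map pvSuffix)).map
        (fun suf => ((pvLset ideas suf).count x : Int)))
      = ((PySem.Set.ofList (ideas.map pvSuffix)).map
        (fun suf => if suf ∈ pvBktC ideas x then (1 : Int) else 0)) := by
    apply List.map_congr_left
    intro suf _
    by_cases hx : x ∈ pvLset ideas suf
    · rw [if_pos ((pvMem_swap _ _ _).mp hx), List.count_eq_one_of_mem (pvLset_nodup _ _) hx]
      norm_num
    · rw [if_neg (fun h => hx ((pvMem_swap _ _ _).mpr h)), List.count_eq_zero_of_not_mem hx]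
      norm_num
  rw [h, pvCountK _ (PySem.Set.nodup_ofList _) _ (pvBktC_nodup ideas x) (pvBktC_sub ideas x)]
  rfl

-- B's per-pair count over the distinct suffixes is the size of A's bucket intersection
theorem pvShared_eq (ideas : List String) (x y : Char) :
    ((PySem.Set.ofList (ideas.map pvSuffix)).map
        (fun suf => if x ∈ pvLset ideas suf ∧ y ∈ pvLset ideas suf then (1 : Int) else 0)).sum
    = PySem.Set.len (PySem.Set.inter (pvBktC ideas x) (pvBktC ideas y)) := by
  have h : ((PySem.Set.ofList (ideas.map pvSuffix)).map
        (fun suf => if x ∈ pvLset ideas suf ∧ y ∈ pvLset ideas suf then (1 : Int) else 0))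
      = ((PySem.Set.ofList (ideas.map pvSuffix)).map
        (fun suf => if suf ∈ PySem.Set.inter (pvBktC ideas x) (pvBktC ideas y)
          then (1 : Int) else 0)) := by
    apply List.map_congr_left
    intro suf _
    congr 1
    rw [eq_iff_iff, PySem.Set.mem_inter, pvMem_swap, pvMem_swap]
  rw [h, pvCountK _ (PySem.Set.nodup_ofList _) _
      (PySem.Set.nodup_inter _ _ (pvBktC_nodup ideas x))
      (fun suf hs => pvBktC_sub ideas x suf ((PySem.Set.mem_inter _ _ _).mp hs).1)]
  rfl

-- B's counting loop computes the two counters independently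
theorem pvCounters (LS : List (List Char))
    (p : PySem.Dict Char Int × PySem.Dict (Char × Char) Int) :
    LS.foldl (fun p letters =>
      letters.foldl (fun (p : PySem.Dict Char Int × PySem.Dict (Char × Char) Int) a =>
        (p.1.insert a (p.1.getD a 0 + 1), pvInnerShared letters a p.2)) p) p
    = (LS.foldl (fun d letters =>
          letters.foldl (fun d a => d.insert a (d.getD a 0 + 1)) d) p.1,
       LS.foldl (fun sh letters =>
          letters.foldl (fun sh a => pvInnerShared letters a sh) sh) p.2) := by
  induction LS generalizing p with
  | nil => rfl
  | cons L LS ih =>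
    simp only [List.foldl_cons]
    rw [pvFoldPair L (fun d a => d.insert a (d.getD a 0 + 1))
        (fun sh a => pvInnerShared L a sh) p, ih]

-- ===== VERDICT (by name: the statement is the Claim_ definition above) =====
theorem distinctNames_spec : Claim_equal_distinctNames := by
  intro ideas _hdom hpre
  show distinctNames ideas = distinctNames_alt ideas
  have hv71 : ∀ s ∈ ideas, 71 ≤ (pvFirst s).toNat ∧ (pvFirst s).toNat ≤ 122 :=
    fun s hs => ⟨by have := (hpre s hs).1; omega, (hpre s hs).2⟩
  -- A's first phase: the 26 buckets
  simp only [distinctNames]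
  rw [pvA_fold ideas hv71 _ (by simp)]
  have hbkt : (List.range 26).map (fun k =>
      ideas.foldl (fun s idea =>
        if pvEff (pvFirst idea) = k then PySem.Set.add s (pvSuffix idea) else s)
        ((List.replicate 26 ([] : PySem.Set String)).getD k []))
      = (List.range 26).map (pvBktE ideas) := by
    apply List.map_congr_left
    intro k hk
    simp only [List.mem_range] at hk
    rw [List.getD_replicate ([] : PySem.Set String) hk]
    rfl
  rw [hbkt]
  -- B's first phase: the suffix → letter-set dict
  simp only [distinctNames_alt]
  have hkeys : (ideas.foldl (fun g idea =>
      g.modify (pvSuffix idea) [] (fun s => PySem.Set.add s (pvFirst idea)))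
      PySem.Dict.empty).keys = PySem.Set.ofList (ideas.map pvSuffix) := by
    rw [PySem.Dict.keys_foldl_modify_key ideas pvSuffix []
        (fun _ idea s => PySem.Set.add s (pvFirst idea)) PySem.Dict.empty]
    rw [PySem.Dict.keys_empty, PySem.Set.update_nil_left]
  have hnodup : (ideas.foldl (fun g idea =>
      g.modify (pvSuffix idea) [] (fun s => PySem.Set.add s (pvFirst idea)))
      PySem.Dict.empty).keys.Nodup := by
    rw [hkeys]; exact PySem.Set.nodup_ofList _
  rw [PySem.Dict.values_eq_map_keys _ hnodup ([] : PySem.Set Char), hkeys,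
      List.map_congr_left (fun suf _ => pvSL_getD ideas PySem.Dict.empty suf)]
  simp only [PySem.Dict.getD_empty]
  -- B's counting loop splits into the two counters
  rw [pvCounters]
  -- both second phases walk the same index pairs: compare the per-pair terms
  apply PySem.List.foldl_congr_mem
  intro cnt i hi
  have hi' := PySem.List.mem_pyRange_one.mp hi
  apply PySem.List.foldl_congr_mem
  intro cnt' j hj
  have hj' := PySem.List.mem_pyRange_one.mp hj
  dsimp only
  -- A's lookups
  have hgi : PySem.List.pyGetD ((List.range 26).map (pvBktE ideas)) i [] = pvBktE ideas i.toNat := by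
    rw [PySem.List.pyGetD_eq_getElem _ _ (by omega) (by simp; omega)]
    simp [List.getElem_map, List.getElem_range]
  have hgj : PySem.List.pyGetD ((List.range 26).map (pvBktE ideas)) j [] = pvBktE ideas j.toNat := by
    rw [PySem.List.pyGetD_eq_getElem _ _ (by omega) (by simp; omega)]
    simp [List.getElem_map, List.getElem_range]
  rw [hgi, hgj, pvBktE_eq ideas hpre i.toNat (by omega), pvBktE_eq ideas hpre j.toNat (by omega)]
  -- B's characters are the same ones
  have hxi : (97 + i).toNat = 97 + i.toNat := by omega
  have hxj : (97 + j).toNat = 97 + j.toNat := by omega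
  rw [hxi, hxj]
  set cx := Char.ofNat (97 + i.toNat) with hcx
  set cy := Char.ofNat (97 + j.toNat) with hcy
  have hlt : cx < cy := by
    rw [pvCharLt, hcx, hcy, pvChrToNat _ (by omega), pvChrToNat _ (by omega)]
    omega
  -- B's counters read back as bucket sizes
  have hndL : ∀ L ∈ (PySem.Set.ofList (ideas.map pvSuffix)).map
      (fun suf => ideas.foldl (fun s idea =>
        if pvSuffix idea = suf then PySem.Set.add s (pvFirst idea) else s) []), L.Nodup := by
    intro L hL
    obtain ⟨suf, _, rfl⟩ := List.mem_map.mp hL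
    exact pvLset_nodup ideas suf
  rw [pvSizeFold, pvSizeFold, pvSharedFold _ _ _ hlt hndL]
  simp only [PySem.Dict.getD_empty, zero_add, List.map_map, Function.comp_def]
  have hsx := pvSize_eq ideas cx
  have hsy := pvSize_eq ideas cy
  have hsh := pvShared_eq ideas cx cy
  unfold pvLset at hsx hsy hsh
  rw [hsx, hsy, hsh]
  -- per-pair arithmetic: |S - (S&T)| = |S| - |S&T|
  rw [pvDiff_inter, pvDiff_inter', pvLenDiff, pvLenDiff,
      pvLenInterComm _ _ (pvBktC_nodup ideas cy) (pvBktC_nodup ideas cx)]
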